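-- pv_equiv track=rewrite | github.com/ElFosco/ALEM | enumerating_methods/saugmecon.py | handle_unfeasibility
-- ===== SOURCE A (Python) =====
-- def handle_unfeasibility(thr_constraints, best_values, worst_values):
--     for index_1 in range(len(thr_constraints)):
--         if thr_constraints[index_1] != worst_values[index_1]:
--             for index_2 in range(index_1 + 1):
--                 thr_constraints[index_2] = best_values[index_2]
--             break
--         if index_1 == len(thr_constraints) - 1:
--             for index_2 in range(index_1 + 1):
--                 thr_constraints[index_2] = best_values[index_2]
--     return thr_constraints
-- ===== SOURCE B (Python) =====
-- def handle_unfeasibility(thr_constraints, best_values, worst_values):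
--     # One pass state machine: while still_equal we emit best_values[i] (and drop
--     # the flag just after the first mismatch); afterwards we emit the element
--     # unchanged. The result is written back in place (same mutation as A).
--     out = []
--     still_equal = True
--     for i, t in enumerate(thr_constraints):
--         if still_equal:
--             out.append(best_values[i])
--             if t != worst_values[i]:
--                 still_equal = False
--         else:
--             out.append(t)
--     thr_constraints[:] = out
--     return thr_constraints
-- ===== Notes on version B (the rewrite author's own statement) =====
-- stated objective: simpler
-- what changed: A's index scan with an in-loop nested prefix-copy, break, and a duplicated last-index copy branch is replaced by a single forward pass state machine with a boolean flag that builds a fresh output list (best-value mode until just past the first mismatch, pass-through mode after) and writes it back in place.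
import Mathlib
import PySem

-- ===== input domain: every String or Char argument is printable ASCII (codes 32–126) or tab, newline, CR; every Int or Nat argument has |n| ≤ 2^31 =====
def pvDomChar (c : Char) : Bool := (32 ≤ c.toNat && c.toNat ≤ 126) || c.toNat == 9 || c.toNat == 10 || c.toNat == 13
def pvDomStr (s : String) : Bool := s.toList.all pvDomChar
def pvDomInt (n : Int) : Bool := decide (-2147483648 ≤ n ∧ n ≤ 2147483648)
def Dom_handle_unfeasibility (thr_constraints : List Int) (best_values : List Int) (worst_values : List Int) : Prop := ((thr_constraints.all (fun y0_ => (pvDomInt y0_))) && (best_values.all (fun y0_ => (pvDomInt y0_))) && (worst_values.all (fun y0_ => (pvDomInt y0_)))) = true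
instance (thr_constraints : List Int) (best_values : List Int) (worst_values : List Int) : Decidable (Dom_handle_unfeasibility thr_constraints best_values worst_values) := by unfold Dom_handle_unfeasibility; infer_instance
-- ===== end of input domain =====

-- B replaces A's index scan with nested prefix-copy and break by a single forward pass
-- with a boolean flag building a fresh list that is written back (objective: simpler).
-- Both A and B mutate thr_constraints in place the same way; the equivalence proved
-- here is about the return value.

-- ===== PORT A =====
-- inner copy loop: for index_2 in range(n): thr[index_2] = best[index_2]
def pvCopyBest (thr best : List Int) (n : Nat) : List Int :=
  (List.range n).foldl (fun t j => t.set j (PySem.List.pyGetD best (j : Int) 0)) thr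

-- the for-loop over index_1 with its break; n = remaining iterations
def pvScanLoop (best worst : List Int) : List Int → Nat → Nat → List Int
  | thr, _, 0 => thr
  | thr, i, Nat.succ m =>
    if PySem.List.pyGetD thr (i : Int) 0 ≠ PySem.List.pyGetD worst (i : Int) 0 then
      pvCopyBest thr best (i + 1)                    -- copy prefix, then break
    else if i = thr.length - 1 then
      pvScanLoop best worst (pvCopyBest thr best (i + 1)) (i + 1) m
    else
      pvScanLoop best worst thr (i + 1) m

def handle_unfeasibility (thr_constraints : List Int) (best_values : List Int) (worst_values : List Int) : List Int :=
  pvScanLoop best_values worst_values thr_constraints 0 thr_constraints.length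

-- ===== PORT B =====
-- loop body of B's single pass: state (out, still_equal), element (i, t)
def pvStep (best worst : List Int) (acc : List Int × Bool) (p : Int × Int) : List Int × Bool :=
  if acc.2 then
    (acc.1 ++ [PySem.List.pyGetD best p.1 0],
     if p.2 ≠ PySem.List.pyGetD worst p.1 0 then false else true)
  else (acc.1 ++ [p.2], false)

-- for i, t in enumerate(thr): step; thr[:] = out; return thr
def handle_unfeasibility_alt (thr_constraints : List Int) (best_values : List Int) (worst_values : List Int) : List Int :=
  ((PySem.List.enumerate thr_constraints 0).foldl (pvStep best_values worst_values) ([], true)).1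

-- ===== PRECONDITION & SPEC =====
-- Pre_ excludes exactly the inputs where Python A raises IndexError: worst_values runs out
-- before a mismatch is found, or best_values is shorter than the prefix being copied.
def Pre_handle_unfeasibility (thr_constraints : List Int) (best_values : List Int) (worst_values : List Int) : Prop :=
  (∃ i < thr_constraints.length,
      i < worst_values.length ∧ i < best_values.length ∧
      (∀ j < i, thr_constraints.getD j 0 = worst_values.getD j 0) ∧
      thr_constraints.getD i 0 ≠ worst_values.getD i 0) ∨
  (thr_constraints.length ≤ worst_values.length ∧
   thr_constraints.length ≤ best_values.length ∧
   ∀ j < thr_constraints.length, thr_constraints.getD j 0 = worst_values.getD j 0)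

instance (thr_constraints : List Int) (best_values : List Int) (worst_values : List Int) : Decidable (Pre_handle_unfeasibility thr_constraints best_values worst_values) := by unfold Pre_handle_unfeasibility; infer_instance

def pvWitness_handle_unfeasibility : List Int × List Int × List Int := ([1, 1], [5, 6], [0, 2])

def Spec_handle_unfeasibility (thr_constraints : List Int) (best_values : List Int) (worst_values : List Int) (out : List Int) : Prop := out = handle_unfeasibility_alt thr_constraints best_values worst_values
instance (thr_constraints : List Int) (best_values : List Int) (worst_values : List Int) (out : List Int) : Decidable (Spec_handle_unfeasibility thr_constraints best_values worst_values out) := by unfold Spec_handle_unfeasibility; infer_instance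

-- ===== CLAIM (what is proved, stated in full; the proofs are below) =====
def Claim_equal_handle_unfeasibility : Prop := ∀ (thr_constraints : List Int) (best_values : List Int) (worst_values : List Int), Dom_handle_unfeasibility thr_constraints best_values worst_values → Pre_handle_unfeasibility thr_constraints best_values worst_values → Spec_handle_unfeasibility thr_constraints best_values worst_values (handle_unfeasibility thr_constraints best_values worst_values)

-- ===== LEMMAS AND PROOFS =====

-- first-mismatch search used to characterize BOTH programs (proof artifact only)
def pvFindLimit (thr worst : List Int) (i : Nat) : Option Nat :=
  if i < thr.length then
    if PySem.List.pyGetD thr (i : Int) 0 ≠ PySem.List.pyGetD worst (i : Int) 0 then some i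
    else pvFindLimit thr worst (i + 1)
  else none
termination_by thr.length - i

lemma pvFindLimit_bounds (thr worst : List Int) :
    ∀ (n i k : Nat), i + n = thr.length → pvFindLimit thr worst i = some k →
      i ≤ k ∧ k < thr.length := by
  intro n
  induction n with
  | zero =>
    intro i k h hf
    rw [pvFindLimit, if_neg (by omega)] at hf
    exact absurd hf (by simp)
  | succ m ih =>
    intro i k h hf
    rw [pvFindLimit, if_pos (by omega)] at hf
    split at hf
    · cases hf; omega
    · have := ih (i + 1) k (by omega) hf; omega

lemma pvScanLoop_eq (best worst : List Int) :
    ∀ (n : Nat) (thr : List Int) (i : Nat), i + n = thr.length →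
      pvScanLoop best worst thr i n =
        match pvFindLimit thr worst i with
        | some k => pvCopyBest thr best (k + 1)
        | none => if n = 0 then thr else pvCopyBest thr best thr.length := by
  intro n
  induction n with
  | zero =>
    intro thr i h
    rw [pvFindLimit]
    simp [pvScanLoop, show ¬ (i < thr.length) by omega]
  | succ m ih =>
    intro thr i h
    have hi : i < thr.length := by omega
    rw [pvFindLimit, if_pos hi, pvScanLoop]
    simp only [PySem.List.pyGetD_natCast, List.getD, ne_eq, ite_not]
    by_cases heq : thr[i]?.getD 0 = worst[i]?.getD 0
    · rw [if_pos heq, if_pos heq]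
      by_cases hlast : i = thr.length - 1
      · have hm : m = 0 := by omega
        have hlen : i + 1 = thr.length := by omega
        subst hm
        rw [if_pos hlast, pvFindLimit]
        simp [pvScanLoop, show ¬ (i + 1 < thr.length) by omega, hlen]
      · have hm : m ≠ 0 := by omega
        rw [if_neg hlast, ih thr (i + 1) (by omega)]
        cases hf : pvFindLimit thr worst (i + 1) <;> simp [hm]
    · rw [if_neg heq, if_neg heq]

-- copy loop writes the best-values prefix, keeps the tail
lemma pvCopyBest_eq (thr best : List Int) :
    ∀ (n : Nat), n ≤ thr.length →
      pvCopyBest thr best n =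
        (List.range' 0 n).map (fun j => best.getD j 0) ++ thr.drop n := by
  intro n
  induction n with
  | zero => simp [pvCopyBest]
  | succ m ih =>
    intro h
    have hm : m < thr.length := by omega
    unfold pvCopyBest
    rw [List.range_succ, List.foldl_append]
    have := ih (by omega)
    unfold pvCopyBest at this
    rw [this]
    simp only [List.foldl_cons, List.foldl_nil, PySem.List.pyGetD_natCast]
    have hlen : ((List.range' 0 m).map (fun j => best.getD j 0)).length = m := by simp
    rw [List.set_append_right _ _ (by omega), hlen]
    simp [List.range'_concat]
    rw [List.drop_eq_getElem_cons hm, List.set_cons_zero]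

-- B's fold, characterized by the same first-mismatch search
lemma pvStep_true (best worst : List Int) (acc : List Int) (p : Int × Int) :
    pvStep best worst (acc, true) p =
      (acc ++ [PySem.List.pyGetD best p.1 0],
       if p.2 ≠ PySem.List.pyGetD worst p.1 0 then false else true) := rfl

lemma pvStep_false (best worst : List Int) (acc : List Int) (p : Int × Int) :
    pvStep best worst (acc, false) p = (acc ++ [p.2], false) := rfl

lemma pvFoldFalse (best worst : List Int) :
    ∀ (l : List (Int × Int)) (acc : List Int),
      l.foldl (pvStep best worst) (acc, false) = (acc ++ l.map (·.2), false) := by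
  intro l
  induction l with
  | nil => simp
  | cons x t ih =>
    intro acc
    rw [List.foldl_cons, pvStep_false, ih]
    simp

lemma pvFoldTrue (thr best worst : List Int) :
    ∀ (n i : Nat) (acc : List Int), i + n = thr.length →
      (PySem.List.enumerate (thr.drop i) i).foldl (pvStep best worst) (acc, true)
      = (match pvFindLimit thr worst i with
         | some k => (acc ++ (List.range' i (k + 1 - i)).map (fun j => best.getD j 0)
                        ++ thr.drop (k + 1), false)
         | none => (acc ++ (List.range' i n).map (fun j => best.getD j 0), true)) := by
  intro n
  induction n with
  | zero =>
    intro i acc h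
    rw [pvFindLimit, if_neg (by omega)]
    simp [List.drop_eq_nil_of_le (by omega : thr.length ≤ i)]
  | succ m ih =>
    intro i acc h
    have hi : i < thr.length := by omega
    rw [List.drop_eq_getElem_cons hi, PySem.List.enumerate_cons, List.foldl_cons,
        pvStep_true, pvFindLimit, if_pos hi]
    simp only [PySem.List.pyGetD_natCast, List.getD, List.getElem?_eq_getElem hi,
      Option.getD_some]
    by_cases heq : thr[i] = worst[i]?.getD 0
    · rw [if_neg (by simpa using heq), if_neg (by simp [heq, List.getD])]
      have hih := ih (i + 1) (acc ++ [best.getD i 0]) (by omega)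
      rw [show ((i + 1 : Nat) : Int) = (i : Int) + 1 by push_cast; ring] at hih
      simp only [List.getD] at hih
      rw [hih]
      cases hf : pvFindLimit thr worst (i + 1) with
      | none =>
        simp only
        rw [List.range'_succ]
        simp [List.getD]
      | some k =>
        have hb := pvFindLimit_bounds thr worst m (i + 1) k (by omega) hf
        simp only
        rw [show k + 1 - i = (k + 1 - (i + 1)) + 1 by omega, List.range'_succ]
        simp [List.getD]
    · rw [if_pos (by simpa using heq), if_pos (by simp [heq, List.getD])]
      rw [pvFoldFalse]
      simp only [PySem.List.map_snd_enumerate]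
      rw [show i + 1 - i = 1 by omega]
      simp [List.getD]

theorem handle_unfeasibility_eq_alt (thr best worst : List Int) :
    handle_unfeasibility thr best worst = handle_unfeasibility_alt thr best worst := by
  unfold handle_unfeasibility handle_unfeasibility_alt
  rw [pvScanLoop_eq best worst thr.length thr 0 (by omega)]
  have hfold := pvFoldTrue thr best worst thr.length 0 [] (by omega)
  simp only [Nat.cast_zero, List.drop_zero] at hfold
  rw [hfold]
  cases hf : pvFindLimit thr worst 0 with
  | none =>
    by_cases h0 : thr.length = 0
    · have : thr = [] := List.eq_nil_of_length_eq_zero h0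
      subst this; simp
    · simp only [h0, if_neg h0]
      rw [pvCopyBest_eq thr best thr.length (by omega)]
      simp [List.range_eq_range']
  | some k =>
    have hb := pvFindLimit_bounds thr worst thr.length 0 k (by omega) hf
    simp only
    rw [pvCopyBest_eq thr best (k + 1) (by omega)]
    simp [List.range_eq_range']

-- ===== VERDICT (by name: the statement is the Claim_ definition above) =====
theorem handle_unfeasibility_spec : Claim_equal_handle_unfeasibility := by
  intro thr best worst _ _
  exact handle_unfeasibility_eq_alt thr best worst
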